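-- pv_equiv track=rewrite | github.com/MaxMcIntyre/AOC-2024 | Day21/part1.py | find_directional_paths
-- ===== SOURCE A (Python) =====
-- from collections import deque
--
-- directional_keypad = {"^": (0,1), "A": (0,2), "<": (1,0), "v": (1,1), ">": (1,2)}
--
-- directional_grid = [[None,"^","A"],["<","v",">"]]
--
-- def calculate_paths(p1, p2, grid):
--     y_diff, x_diff = p2[0] - p1[0], p2[1] - p1[1]
--     y_dir = "v" if y_diff >= 0 else "^"
--     x_dir = ">" if x_diff >= 0 else "<"
--     y_move = 1 if y_diff >= 0 else -1
--     x_move = 1 if x_diff >= 0 else -1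
--
--     queue = deque([(p1, "")])
--     paths = []
--
--     while queue:
--         curr, directions = queue.popleft()
--         if curr == p2:
--             directions += "A"
--             paths.append(directions)
--         else:
--             y, x = curr
--             if y != p2[0] and grid[y + y_move][x]:
--                 directions_y = directions + y_dir
--                 queue.append(((y + y_move, x), directions_y))
--             if x != p2[1] and grid[y][x + x_move]:
--                 directions_x = directions + x_dir
--                 queue.append(((y, x + x_move), directions_x))
--
--     return paths
--
-- def find_directional_paths(paths):
--     all_paths = []
--     for path in paths:
--         next_paths = [""]
--         for i in range(len(path)):
--             start = "A" if i == 0 else path[i-1]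
--             end = path[i]
--
--             directional_paths = calculate_paths(directional_keypad[start], directional_keypad[end], directional_grid)
--             next_paths = [path1 + path2 for path1 in next_paths for path2 in directional_paths]
--
--         all_paths.extend(next_paths)
--
--     return all_paths
-- ===== SOURCE B (Python) =====
-- # Table-driven: the 25 per-step path lists are precomputed constants (the keypad is
-- # fixed), and each path is expanded by a recursion over its characters.
-- SEGMENTS = {
--     ('^', '^'): ['A'],        ('^', 'A'): ['>A'],
--     ('^', '<'): ['v<A'],      ('^', 'v'): ['vA'],
--     ('^', '>'): ['v>A', '>vA'],
--     ('A', '^'): ['<A'],       ('A', 'A'): ['A'],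
--     ('A', '<'): ['v<<A', '<v<A'],
--     ('A', 'v'): ['v<A', '<vA'],
--     ('A', '>'): ['vA'],
--     ('<', '^'): ['>^A'],      ('<', 'A'): ['>^>A', '>>^A'],
--     ('<', '<'): ['A'],        ('<', 'v'): ['>A'],
--     ('<', '>'): ['>>A'],
--     ('v', '^'): ['^A'],       ('v', 'A'): ['^>A', '>^A'],
--     ('v', '<'): ['<A'],       ('v', 'v'): ['A'],
--     ('v', '>'): ['>A'],
--     ('>', '^'): ['^<A', '<^A'],
--     ('>', 'A'): ['^A'],       ('>', '<'): ['<<A'],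
--     ('>', 'v'): ['<A'],       ('>', '>'): ['A'],
-- }
--
-- def expand(prev, rest):
--     if not rest:
--         return [""]
--     return [seg + tail
--             for seg in SEGMENTS[(prev, rest[0])]
--             for tail in expand(rest[0], rest[1:])]
--
-- def find_directional_paths(paths):
--     out = []
--     for path in paths:
--         out.extend(expand("A", path))
--     return out
-- ===== Notes on version B (the rewrite author's own statement) =====
-- stated objective: alternative
-- what changed: B replaces the per-step BFS over the grid and the incremental cross-product fold by a precomputed 25-entry segment table (the keypad is a fixed constant) and a single recursion over each path's characters that concatenates table segments with recursively expanded tails.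
import Mathlib
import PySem

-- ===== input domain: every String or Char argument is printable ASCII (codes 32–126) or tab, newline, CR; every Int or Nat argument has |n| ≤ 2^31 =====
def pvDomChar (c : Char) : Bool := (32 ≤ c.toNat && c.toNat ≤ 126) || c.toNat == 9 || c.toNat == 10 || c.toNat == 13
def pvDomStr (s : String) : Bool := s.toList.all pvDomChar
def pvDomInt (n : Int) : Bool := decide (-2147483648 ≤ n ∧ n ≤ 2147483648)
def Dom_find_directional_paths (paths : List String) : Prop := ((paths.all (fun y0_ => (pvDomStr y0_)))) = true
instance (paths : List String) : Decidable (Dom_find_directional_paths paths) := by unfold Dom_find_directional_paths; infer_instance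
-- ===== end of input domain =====

-- B drops the per-step BFS and grid entirely: the keypad is a fixed constant, so the 25
-- per-step path lists are a precomputed table, and each path is expanded by a recursion
-- over its characters (objective: alternative).

-- ===== PORT A =====

-- directional_keypad[c]; Pre_ restricts chars to the five keys, so the KeyError branch
-- (here the dummy (1,2)) is never taken inside Pre_.
def keypad (c : Char) : Int × Int :=
  if c = '^' then (0,1) else if c = 'A' then (0,2) else if c = '<' then (1,0)
  else if c = 'v' then (1,1) else (1,2)

-- directional_grid as Option String cells; truthiness of grid[y][x].
-- Python raises IndexError out of range; for keypad positions the accesses below are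
-- always in range, so the `false` there is unreachable on admitted inputs.
def grid0 : List (List (Option String)) := [[none, some "^", some "A"], [some "<", some "v", some ">"]]

def gridTruthy (y x : Int) : Bool :=
  match PySem.List.pyGet? grid0 y with
  | some row => match PySem.List.pyGet? row x with
    | some (some _) => true
    | _ => false
  | none => false

-- the BFS while-loop of calculate_paths; fuel only makes the loop total (it never runs
-- out: 20 exceeds the number of nodes the BFS can enqueue from keypad positions).
def bfsA (p2 : Int × Int) (ydir xdir : Char) (ymove xmove : Int) :
    Nat → List ((Int × Int) × List Char) → List (List Char) → List (List Char)
  | 0, _, paths => paths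
  | _, [], paths => paths
  | fuel+1, (curr, dirs) :: rest, paths =>
    if curr = p2 then
      bfsA p2 ydir xdir ymove xmove fuel rest (paths ++ [dirs ++ ['A']])
    else
      let q1 := if curr.1 ≠ p2.1 ∧ gridTruthy (curr.1 + ymove) curr.2 then
          rest ++ [((curr.1 + ymove, curr.2), dirs ++ [ydir])] else rest
      let q2 := if curr.2 ≠ p2.2 ∧ gridTruthy curr.1 (curr.2 + xmove) then
          q1 ++ [((curr.1, curr.2 + xmove), dirs ++ [xdir])] else q1
      bfsA p2 ydir xdir ymove xmove fuel q2 paths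

def calculate_pathsA (p1 p2 : Int × Int) : List (List Char) :=
  let ydiff := p2.1 - p1.1
  let xdiff := p2.2 - p1.2
  let ydir := if ydiff ≥ 0 then 'v' else '^'
  let xdir := if xdiff ≥ 0 then '>' else '<'
  let ymove : Int := if ydiff ≥ 0 then 1 else -1
  let xmove : Int := if xdiff ≥ 0 then 1 else -1
  bfsA p2 ydir xdir ymove xmove 20 [(p1, [])] []

def find_directional_paths (paths : List String) : List String :=
  (paths.foldl (fun all_paths path =>
    let cs := path.toList
    let next_paths := (List.range cs.length).foldl (fun next_paths i =>
      let start := if i = 0 then 'A' else cs.getD (i-1) 'A'   -- getD default unreachable: i < cs.length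
      let stop := cs.getD i 'A'
      let directional_paths := calculate_pathsA (keypad start) (keypad stop)
      next_paths.flatMap (fun path1 => directional_paths.map (fun path2 => path1 ++ path2))) [[]]
    all_paths ++ next_paths) []).map String.ofList

-- ===== PORT B =====

-- SEGMENTS[(prev, c)]: the 25 precomputed per-step path lists; [] plays the role of the
-- KeyError branch (never reached inside Pre_).
def segTable (prev c : Char) : List (List Char) :=
  match prev, c with
  | '^', '^' => [['A']]
  | '^', 'A' => [['>','A']]
  | '^', '<' => [['v','<','A']]
  | '^', 'v' => [['v','A']]
  | '^', '>' => [['v','>','A'], ['>','v','A']]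
  | 'A', '^' => [['<','A']]
  | 'A', 'A' => [['A']]
  | 'A', '<' => [['v','<','<','A'], ['<','v','<','A']]
  | 'A', 'v' => [['v','<','A'], ['<','v','A']]
  | 'A', '>' => [['v','A']]
  | '<', '^' => [['>','^','A']]
  | '<', 'A' => [['>','^','>','A'], ['>','>','^','A']]
  | '<', '<' => [['A']]
  | '<', 'v' => [['>','A']]
  | '<', '>' => [['>','>','A']]
  | 'v', '^' => [['^','A']]
  | 'v', 'A' => [['^','>','A'], ['>','^','A']]
  | 'v', '<' => [['<','A']]
  | 'v', 'v' => [['A']]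
  | 'v', '>' => [['>','A']]
  | '>', '^' => [['^','<','A'], ['<','^','A']]
  | '>', 'A' => [['^','A']]
  | '>', '<' => [['<','<','A']]
  | '>', 'v' => [['<','A']]
  | '>', '>' => [['A']]
  | _, _ => []

-- expand(prev, rest): recursion over the path's characters
def expandB (prev : Char) : List Char → List (List Char)
  | [] => [[]]
  | c :: rest => (segTable prev c).flatMap (fun seg => (expandB c rest).map (fun tail => seg ++ tail))

def find_directional_paths_alt (paths : List String) : List String :=
  (paths.flatMap (fun path => expandB 'A' path.toList)).map String.ofList

-- ===== PRECONDITION & SPEC =====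
-- Pre_ excludes exactly the inputs on which Python A raises KeyError: a character of some
-- path that is not one of the five directional-keypad keys.
def Pre_find_directional_paths (paths : List String) : Prop :=
  (paths.all (fun p => p.toList.all (fun c => ['^', 'A', '<', 'v', '>'].contains c))) = true
instance (paths : List String) : Decidable (Pre_find_directional_paths paths) := by
  unfold Pre_find_directional_paths; infer_instance

def pvWitness_find_directional_paths : List String := ["<A"]

def Spec_find_directional_paths (paths : List String) (out : List String) : Prop := out = find_directional_paths_alt paths
instance (paths : List String) (out : List String) : Decidable (Spec_find_directional_paths paths out) := by unfold Spec_find_directional_paths; infer_instance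

-- ===== CLAIM (what is proved, stated in full; the proofs are below) =====
def Claim_equal_find_directional_paths : Prop := ∀ (paths : List String), Dom_find_directional_paths paths → Pre_find_directional_paths paths → Spec_find_directional_paths paths (find_directional_paths paths)

-- ===== LEMMAS AND PROOFS =====

-- itertools-style product-join over a list of option lists (proof-side helper)
def productJoinB : List (List (List Char)) → List (List Char)
  | [] => [[]]
  | o :: os => o.flatMap (fun x => (productJoinB os).map (fun rest => x ++ rest))

-- consecutive (previous, current) character pairs of a path (proof-side helper)
def pairsOf (prev : Char) : List Char → List (Char × Char)
  | [] => []
  | c :: rest => (prev, c) :: pairsOf c rest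

-- A's BFS agrees with B's table on every pair of keypad keys (25 concrete cases)
theorem table_eq : ∀ s ∈ ['^', 'A', '<', 'v', '>'], ∀ e ∈ ['^', 'A', '<', 'v', '>'],
    calculate_pathsA (keypad s) (keypad e) = segTable s e := by
  intro s hs e he
  fin_cases hs <;> fin_cases he <;> decide

-- A's incremental cross-product fold equals the product-join of the per-step lists
theorem foldl_cross_eq_productJoin (steps : List (List (List Char))) (acc : List (List Char)) :
    steps.foldl (fun next_paths l =>
        next_paths.flatMap (fun p1 => l.map (fun p2 => p1 ++ p2))) acc
      = acc.flatMap (fun p => (productJoinB steps).map (fun rest => p ++ rest)) := by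
  induction steps generalizing acc with
  | nil => simp [productJoinB]
  | cons l ls ih =>
    rw [List.foldl_cons, ih, productJoinB]
    simp [List.flatMap_map, List.map_flatMap, List.flatMap_assoc, List.append_assoc, Function.comp_def]

-- A's fold over range(len(path)) with per-index step list g equals the product-join
theorem foldl_range_cross (g : Nat → List (List Char)) (n : Nat) :
    List.foldl (fun next_paths i =>
        next_paths.flatMap (fun p1 => (g i).map (fun p2 => p1 ++ p2))) [[]] (List.range n)
      = productJoinB ((List.range n).map g) := by
  have h1 := List.foldl_map (f := g)
      (g := fun np (l : List (List Char)) => np.flatMap (fun p1 => l.map (fun p2 => p1 ++ p2)))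
      (l := List.range n) (init := ([[]] : List (List Char)))
  have h2 := foldl_cross_eq_productJoin ((List.range n).map g) [[]]
  exact h1.symm.trans (h2.trans (by simp))

-- A's index-based (start, stop) enumeration equals the pair list of consecutive chars
theorem range_map_pairs {α : Type} (F : Char → Char → α) (cs : List Char) (prev : Char) :
    (List.range cs.length).map (fun i =>
        F (if i = 0 then prev else cs.getD (i-1) 'A') (cs.getD i 'A'))
      = (pairsOf prev cs).map (fun p => F p.1 p.2) := by
  induction cs generalizing prev with
  | nil => simp [pairsOf]
  | cons c rest ih =>
    rw [List.length_cons, List.range_succ_eq_map, List.map_cons, List.map_map]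
    have htail : (List.range rest.length).map ((fun i =>
          F (if i = 0 then prev else (c :: rest).getD (i-1) 'A') ((c :: rest).getD i 'A')) ∘ Nat.succ)
        = (List.range rest.length).map (fun i =>
          F (if i = 0 then c else rest.getD (i-1) 'A') (rest.getD i 'A')) := by
      apply List.map_congr_left
      intro j hj
      rw [List.mem_range] at hj
      simp only [Function.comp_apply, Nat.succ_eq_add_one]
      have h1 : j + 1 ≠ 0 := by omega
      have h2 : (c :: rest).getD (j + 1 - 1) 'A' = if j = 0 then c else rest.getD (j-1) 'A' := by
        rcases j with _ | j <;> simp [List.getD]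
      have h3 : (c :: rest).getD (j + 1) 'A' = rest.getD j 'A' := by simp [List.getD]
      rw [if_neg h1, h2, h3]
    rw [htail, ih c]
    simp [pairsOf]

-- B's recursion equals the product-join of the table rows along the pair list
theorem expand_eq_productJoin (cs : List Char) (prev : Char) :
    expandB prev cs = productJoinB ((pairsOf prev cs).map (fun p => segTable p.1 p.2)) := by
  induction cs generalizing prev with
  | nil => simp [expandB, pairsOf, productJoinB]
  | cons c rest ih => simp [expandB, pairsOf, productJoinB, ih c]

theorem mem_pairsOf (cs : List Char) (prev : Char) :
    ∀ p ∈ pairsOf prev cs, (p.1 = prev ∨ p.1 ∈ cs) ∧ p.2 ∈ cs := by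
  induction cs generalizing prev with
  | nil => simp [pairsOf]
  | cons c rest ih =>
    intro p hp
    rw [pairsOf, List.mem_cons] at hp
    rcases hp with rfl | hp
    · simp
    · rcases ih c p hp with ⟨h1, h2⟩
      refine ⟨Or.inr ?_, List.mem_cons_of_mem _ h2⟩
      rcases h1 with h1 | h1
      · rw [h1]; simp
      · simp [h1]

theorem find_directional_paths_spec' (paths : List String)
    (hpre : Pre_find_directional_paths paths) :
    find_directional_paths paths = find_directional_paths_alt paths := by
  unfold find_directional_paths find_directional_paths_alt
  rw [PySem.List.foldl_append_eq_flatMap]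
  simp only [List.nil_append]
  congr 1
  apply List.flatMap_congr
  intro path hp
  have hchars : ∀ c ∈ path.toList, c ∈ ['^', 'A', '<', 'v', '>'] := by
    have h1 := List.all_eq_true.mp hpre path hp
    intro c hc
    have h2 := List.all_eq_true.mp h1 c hc
    simpa using h2
  rw [foldl_range_cross (fun i =>
        calculate_pathsA (keypad (if i = 0 then 'A' else path.toList.getD (i-1) 'A'))
                         (keypad (path.toList.getD i 'A'))) path.toList.length,
      range_map_pairs (fun s e => calculate_pathsA (keypad s) (keypad e)) path.toList 'A',
      expand_eq_productJoin path.toList 'A']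
  congr 1
  apply List.map_congr_left
  intro p hp2
  rcases mem_pairsOf path.toList 'A' p hp2 with ⟨h1, h2⟩
  have hs : p.1 ∈ ['^', 'A', '<', 'v', '>'] := by
    rcases h1 with h1 | h1
    · rw [h1]; simp
    · exact hchars _ h1
  exact table_eq _ hs _ (hchars _ h2)

-- ===== VERDICT (by name: the statement is the Claim_ definition above) =====
theorem find_directional_paths_spec : Claim_equal_find_directional_paths := by
  intro paths _ hpre
  exact find_directional_paths_spec' paths hpre
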